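-- pv_equiv track=rewrite | github.com/regolo-ai/tutorials | ai-governance-copyright/main.py | choose_chat_model
-- ===== SOURCE A (Python) =====
-- from typing import Any, Dict, List
--
-- def model_name(m: Dict[str, Any]) -> str:
--     for key in ("id", "name", "model", "slug"):
--         if key in m and m[key]:
--             return str(m[key])
--     return "unknown-model"
--
-- def choose_chat_model(models: List[Dict[str, Any]]) -> str:
--     names = [model_name(m) for m in models]
--     for preferred in ("llama", "qwen", "gpt-oss"):
--         for n in names:
--             if preferred in n.lower():
--                 return n
--     if not names:
--         raise RuntimeError("No models found from Regolo /models")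
--     return names[0]
-- ===== SOURCE B (Python) =====
-- def model_name(m):
--     keys = ("id", "name", "model", "slug")
--     return next((str(m[k]) for k in keys if m.get(k)), "unknown-model")
--
--
-- def choose_chat_model(models):
--     prefs = ("llama", "qwen", "gpt-oss")
--     best_rank = len(prefs) + 1
--     best_name = None
--     for m in models:
--         n = model_name(m)
--         low = n.lower()
--         r = next((j for j, p in enumerate(prefs) if p in low), len(prefs))
--         if r < best_rank:
--             best_rank, best_name = r, n
--     if best_name is None:
--         raise RuntimeError("No models found from Regolo /models")
--     return best_name
-- ===== Notes on version B (the rewrite author's own statement) =====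
-- stated objective: alternative
-- what changed: Replaces A's three sequential scans over the name list (one per preference) by a single pass over the models that scores each name by its first-matching preference index and keeps the earliest lowest-ranked candidate.
import Mathlib
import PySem

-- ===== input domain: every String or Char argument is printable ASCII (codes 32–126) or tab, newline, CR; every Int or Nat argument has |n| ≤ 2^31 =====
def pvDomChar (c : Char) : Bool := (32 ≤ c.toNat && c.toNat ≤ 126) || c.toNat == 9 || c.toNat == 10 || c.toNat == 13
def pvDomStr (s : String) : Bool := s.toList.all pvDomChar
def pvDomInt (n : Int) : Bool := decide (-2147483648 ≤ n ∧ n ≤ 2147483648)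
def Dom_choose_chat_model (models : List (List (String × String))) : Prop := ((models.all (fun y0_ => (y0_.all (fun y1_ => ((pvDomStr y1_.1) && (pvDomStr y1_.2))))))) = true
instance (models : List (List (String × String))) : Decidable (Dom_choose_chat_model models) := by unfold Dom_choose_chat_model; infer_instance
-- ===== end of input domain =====

-- B replaces A's three sequential scans of the name list (one per preference) by a single
-- scoring pass that keeps the earliest candidate with the smallest matching-preference rank
-- (objective: alternative, same asymptotic cost).

-- ===== PORT A =====
-- for key in ("id", "name", "model", "slug"): if key in m and m[key]: return str(m[key])
def model_name_loop (m : List (String × String)) : List String → String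
  | [] => "unknown-model"
  | k :: ks =>
    match PySem.Dict.get? (PySem.Dict.mk m) k with
    | some v => if v ≠ "" then v else model_name_loop m ks
    | none => model_name_loop m ks

def model_name (m : List (String × String)) : String :=
  model_name_loop m ["id", "name", "model", "slug"]

-- for preferred in prefs: for n in names: if preferred in n.lower(): return n
def choose_loopA (names : List String) : List String → Option String
  | [] => none
  | p :: ps =>
    match names.find? (fun n => PySem.Str.isIn p (PySem.Str.lower n)) with
    | some n => some n
    | none => choose_loopA names ps

def choose_chat_model (models : List (List (String × String))) : String :=
  let names := models.map model_name
  match choose_loopA names ["llama", "qwen", "gpt-oss"] with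
  | some n => n
  | none => names.headD ""   -- names[0]; names = [] raises RuntimeError in Python, excluded by Pre_

-- ===== PORT B =====
-- next((str(m[k]) for k in keys if m.get(k)), "unknown-model")
def model_name_B (m : List (String × String)) : String :=
  match (["id", "name", "model", "slug"] : List String).find?
      (fun k => ((PySem.Dict.get? (PySem.Dict.mk m) k).getD "") != "") with
  | some k => (PySem.Dict.get? (PySem.Dict.mk m) k).getD ""
  | none => "unknown-model"

-- next((j for j, p in enumerate(prefs) if p in low), len(prefs))
def rank_B (low : String) : List String → Nat
  | [] => 0
  | p :: ps => if PySem.Str.isIn p low then 0 else 1 + rank_B low ps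

-- the single scoring pass: state = (best_rank, best_name)
def choose_loopB : List (List (String × String)) → Nat → Option String → Option String
  | [], _, best => best
  | m :: ms, br, best =>
    let n := model_name_B m
    let r := rank_B (PySem.Str.lower n) ["llama", "qwen", "gpt-oss"]
    if r < br then choose_loopB ms r (some n) else choose_loopB ms br best

def choose_chat_model_alt (models : List (List (String × String))) : String :=
  match choose_loopB models 4 none with
  | some n => n
  | none => ""   -- best_name is None ⇒ RuntimeError in Python, excluded by Pre_

-- ===== PRECONDITION & SPEC =====
-- Pre_ excludes only the empty model list, on which the Python A (and B) raise RuntimeError.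
def Pre_choose_chat_model (models : List (List (String × String))) : Prop := models ≠ []
instance (models : List (List (String × String))) : Decidable (Pre_choose_chat_model models) := by
  unfold Pre_choose_chat_model; infer_instance

def pvWitness_choose_chat_model : (List (List (String × String))) := [[("id", "Llama-3-8B")]]

def Spec_choose_chat_model (models : List (List (String × String))) (out : String) : Prop := out = choose_chat_model_alt models
instance (models : List (List (String × String))) (out : String) : Decidable (Spec_choose_chat_model models out) := by unfold Spec_choose_chat_model; infer_instance

-- ===== CLAIM (what is proved, stated in full; the proofs are below) =====
def Claim_equal_choose_chat_model : Prop := ∀ (models : List (List (String × String))), Dom_choose_chat_model models → Pre_choose_chat_model models → Spec_choose_chat_model models (choose_chat_model models)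

-- ===== LEMMAS AND PROOFS =====

-- B's model_name equals A's model_name
theorem model_name_B_loop (m : List (String × String)) (ks : List String) :
    (match ks.find? (fun k => ((PySem.Dict.get? (PySem.Dict.mk m) k).getD "") != "") with
      | some k => (PySem.Dict.get? (PySem.Dict.mk m) k).getD ""
      | none => "unknown-model") = model_name_loop m ks := by
  induction ks with
  | nil => rfl
  | cons k ks ih =>
    cases h : PySem.Dict.get? (PySem.Dict.mk m) k with
    | none => simp [model_name_loop, List.find?, h, ← ih]
    | some v =>
      by_cases hv : v = ""
      · simp [model_name_loop, List.find?, h, hv, ← ih]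
      · have hb : (v != "") = true := by simp [hv]
        simp [model_name_loop, List.find?, h, hv, hb]

theorem model_name_B_eq (m : List (String × String)) : model_name_B m = model_name m := by
  simpa [model_name_B, model_name] using model_name_B_loop m ["id", "name", "model", "slug"]

-- abbreviations used only by the proofs
def gP (p : String) (m : List (String × String)) : Bool :=
  PySem.Str.isIn p (PySem.Str.lower (model_name_B m))

def rk (m : List (String × String)) : Nat :=
  rank_B (PySem.Str.lower (model_name_B m)) ["llama", "qwen", "gpt-oss"]

theorem rk_eq (m : List (String × String)) :
    rk m = if gP "llama" m then 0 else if gP "qwen" m then 1 else if gP "gpt-oss" m then 2 else 3 := by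
  simp only [rk, rank_B, gP]
  split_ifs <;> rfl

-- the fallback chain both programs compute, over the model list
def chain3 (ms : List (List (String × String))) (d : String) : String :=
  match ms.find? (gP "llama") with
  | some m => model_name_B m
  | none =>
    match ms.find? (gP "qwen") with
    | some m => model_name_B m
    | none =>
      match ms.find? (gP "gpt-oss") with
      | some m => model_name_B m
      | none => d

theorem loopB_zero (ms : List (List (String × String))) (b : Option String) :
    choose_loopB ms 0 b = b := by
  induction ms with
  | nil => rfl
  | cons m ms ih => simp [choose_loopB, ih]

theorem loopB_one (ms : List (List (String × String))) (n : String) :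
    choose_loopB ms 1 (some n) =
      some (match ms.find? (gP "llama") with
            | some m => model_name_B m
            | none => n) := by
  induction ms with
  | nil => rfl
  | cons m ms ih =>
    by_cases h0 : gP "llama" m
    · have : rk m = 0 := by rw [rk_eq]; simp [h0]
      simp only [choose_loopB]
      rw [show rank_B (PySem.Str.lower (model_name_B m)) ["llama", "qwen", "gpt-oss"] = rk m from rfl, this]
      simp [loopB_zero, List.find?, h0]
    · have : ¬ rk m < 1 := by
        rw [rk_eq]; split_ifs <;> omega
      simp only [choose_loopB]
      rw [show rank_B (PySem.Str.lower (model_name_B m)) ["llama", "qwen", "gpt-oss"] = rk m from rfl]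
      simp [this, ih, List.find?, h0]

theorem loopB_two (ms : List (List (String × String))) (n : String) :
    choose_loopB ms 2 (some n) =
      some (match ms.find? (gP "llama") with
            | some m => model_name_B m
            | none =>
              match ms.find? (gP "qwen") with
              | some m => model_name_B m
              | none => n) := by
  induction ms with
  | nil => rfl
  | cons m ms ih =>
    simp only [choose_loopB]
    rw [show rank_B (PySem.Str.lower (model_name_B m)) ["llama", "qwen", "gpt-oss"] = rk m from rfl]
    by_cases h0 : gP "llama" m
    · have : rk m = 0 := by rw [rk_eq]; simp [h0]
      rw [this]; simp [loopB_zero, List.find?, h0]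
    · by_cases h1 : gP "qwen" m
      · have : rk m = 1 := by rw [rk_eq]; simp [h0, h1]
        rw [this]; simp only [show (1 : Nat) < 2 from by omega, if_true]
        rw [loopB_one]
        simp [List.find?, h0, h1]
      · have : ¬ rk m < 2 := by
          rw [rk_eq]
          split_ifs <;> omega
        simp [this, ih, List.find?, h0, h1]

theorem loopB_three (ms : List (List (String × String))) (n : String) :
    choose_loopB ms 3 (some n) = some (chain3 ms n) := by
  induction ms with
  | nil => rfl
  | cons m ms ih =>
    simp only [choose_loopB]
    rw [show rank_B (PySem.Str.lower (model_name_B m)) ["llama", "qwen", "gpt-oss"] = rk m from rfl]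
    by_cases h0 : gP "llama" m
    · have : rk m = 0 := by rw [rk_eq]; simp [h0]
      rw [this]; simp [loopB_zero, chain3, List.find?, h0]
    · by_cases h1 : gP "qwen" m
      · have : rk m = 1 := by rw [rk_eq]; simp [h0, h1]
        rw [this]; simp only [show (1 : Nat) < 3 from by omega, if_true]
        rw [loopB_one]; simp [chain3, List.find?, h0, h1]
      · by_cases h2 : gP "gpt-oss" m
        · have : rk m = 2 := by rw [rk_eq]; simp [h0, h1, h2]
          rw [this]; simp only [show (2 : Nat) < 3 from by omega, if_true]
          rw [loopB_two]; simp [chain3, List.find?, h0, h1, h2]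
        · have : ¬ rk m < 3 := by
            rw [rk_eq]
            split_ifs <;> omega
          simp [this, ih, chain3, List.find?, h0, h1, h2]

theorem loopB_top (m : List (String × String)) (ms : List (List (String × String))) :
    choose_loopB (m :: ms) 4 none = some (chain3 (m :: ms) (model_name_B m)) := by
  simp only [choose_loopB]
  rw [show rank_B (PySem.Str.lower (model_name_B m)) ["llama", "qwen", "gpt-oss"] = rk m from rfl]
  by_cases h0 : gP "llama" m
  · have : rk m = 0 := by rw [rk_eq]; simp [h0]
    rw [this]; simp [loopB_zero, chain3, List.find?, h0]
  · by_cases h1 : gP "qwen" m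
    · have : rk m = 1 := by rw [rk_eq]; simp [h0, h1]
      rw [this]; simp only [show (1 : Nat) < 4 from by omega, if_true]
      rw [loopB_one]; simp [chain3, List.find?, h0, h1]
    · by_cases h2 : gP "gpt-oss" m
      · have : rk m = 2 := by rw [rk_eq]; simp [h0, h1, h2]
        rw [this]; simp only [show (2 : Nat) < 4 from by omega, if_true]
        rw [loopB_two]; simp [chain3, List.find?, h0, h1, h2]
      · have : rk m = 3 := by rw [rk_eq]; simp [h0, h1, h2]
        rw [this]; simp only [show (3 : Nat) < 4 from by omega, if_true]
        rw [loopB_three]; simp [chain3, List.find?, h0, h1, h2]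

-- A's find? over names reduces to a find? over models
theorem findA_eq (p : String) (ms : List (List (String × String))) :
    (ms.map model_name).find? (fun n => PySem.Str.isIn p (PySem.Str.lower n)) =
      (ms.find? (gP p)).map model_name_B := by
  rw [List.find?_map]
  have h1 : ((fun n => PySem.Str.isIn p (PySem.Str.lower n)) ∘ model_name) = gP p := by
    funext m; simp [Function.comp, gP, model_name_B_eq]
  rw [h1]
  congr 1
  funext m; exact (model_name_B_eq m).symm

-- A on a nonempty list computes the same chain
theorem A_eq_chain (m : List (String × String)) (ms : List (List (String × String))) :
    choose_chat_model (m :: ms) = chain3 (m :: ms) (model_name_B m) := by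
  simp only [choose_chat_model, choose_loopA, chain3, findA_eq]
  cases (m :: ms).find? (gP "llama") with
  | some x => simp
  | none =>
    simp only [Option.map_none]
    cases (m :: ms).find? (gP "qwen") with
    | some x => simp
    | none =>
      simp only [Option.map_none]
      cases (m :: ms).find? (gP "gpt-oss") with
      | some x => simp
      | none => simp [model_name_B_eq]

-- ===== VERDICT (by name: the statement is the Claim_ definition above) =====
theorem choose_chat_model_spec : Claim_equal_choose_chat_model := by
  intro models _ hpre
  cases models with
  | nil => exact absurd rfl hpre
  | cons m ms =>
    show choose_chat_model (m :: ms) = choose_chat_model_alt (m :: ms)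
    rw [A_eq_chain, choose_chat_model_alt, loopB_top]
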